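-- pv_equiv track=rewrite | github.com/zivattias/python | lesson12-hw/dict_practice/b8.1.py | dict_creator
-- ===== SOURCE A (Python) =====
-- def dict_creator(models: list, colors: list) -> dict[str: list[str]]:
--     ret_val = dict()
--     for model, color in zip(models, colors):
--         if model not in ret_val:
--             ret_val[model] = []
--         if color in ret_val[model]:
--             continue
--         ret_val[model].append(color)
--     return ret_val
-- ===== SOURCE B (Python) =====
-- def dict_creator(models: list, colors: list) -> dict:
--     pairs = list(zip(models, colors))
--     order = list(dict.fromkeys(m for m, _ in pairs))
--     return {m: list(dict.fromkeys(c for mm, c in pairs if mm == m))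
--             for m in order}
-- ===== Notes on version B (the rewrite author's own statement) =====
-- stated objective: alternative
-- what changed: B builds no dict incrementally: it first computes the list of distinct models in first-occurrence order, then for each such model scans the whole pair list once and deduplicates that model's colors with dict.fromkeys, assembling the result in a comprehension.
import Mathlib
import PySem

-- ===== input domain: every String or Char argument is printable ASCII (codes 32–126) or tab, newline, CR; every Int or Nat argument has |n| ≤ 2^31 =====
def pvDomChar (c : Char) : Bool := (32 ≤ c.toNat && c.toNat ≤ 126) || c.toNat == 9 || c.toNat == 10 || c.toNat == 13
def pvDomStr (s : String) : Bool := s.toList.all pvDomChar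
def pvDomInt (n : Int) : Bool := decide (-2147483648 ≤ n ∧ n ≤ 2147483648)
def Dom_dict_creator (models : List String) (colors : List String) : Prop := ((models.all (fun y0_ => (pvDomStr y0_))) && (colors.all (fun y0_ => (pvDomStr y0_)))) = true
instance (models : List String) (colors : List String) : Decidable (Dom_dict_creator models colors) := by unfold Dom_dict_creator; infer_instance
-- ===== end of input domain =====

-- B drops A's incremental dict build: it lists the distinct models first, then
-- computes each model's deduplicated color list by a fresh scan of the pairs
-- (a different algorithm of similar cost, not claimed faster).

-- ===== PORT A =====
-- loop body of A: maybe create the empty group, then append unless already present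
def pvStepA (d : PySem.Dict String (List String)) (p : String × String) :
    PySem.Dict String (List String) :=
  let d1 := if d.contains p.1 then d else d.insert p.1 []
  if p.2 ∈ d1.getD p.1 [] then d1 else d1.modify p.1 [] (fun l => l ++ [p.2])

def dict_creator (models : List String) (colors : List String) : List (String × List String) :=
  ((models.zip colors).foldl pvStepA PySem.Dict.empty).items

-- ===== PORT B =====
-- pairs = zip; order = dedup of the models; per model, dedup of its colors
def dict_creator_alt (models : List String) (colors : List String) : List (String × List String) :=
  let pairs := models.zip colors
  let order := PySem.List.dedup (pairs.map (fun p => p.1))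
  order.map (fun m =>
    (m, PySem.List.dedup ((pairs.filter (fun p => p.1 == m)).map (fun p => p.2))))

-- ===== PRECONDITION & SPEC =====
def Spec_dict_creator (models : List String) (colors : List String) (out : List (String × List String)) : Prop := out = dict_creator_alt models colors
instance (models : List String) (colors : List String) (out : List (String × List String)) : Decidable (Spec_dict_creator models colors out) := by unfold Spec_dict_creator; infer_instance

-- ===== CLAIM (what is proved, stated in full; the proofs are below) =====
def Claim_equal_dict_creator : Prop := ∀ (models : List String) (colors : List String), Dom_dict_creator models colors → Spec_dict_creator models colors (dict_creator models colors)

-- ===== LEMMAS AND PROOFS =====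

-- B's table viewed as a function of the pair list
def pvTab (l : List (String × String)) : List (String × List String) :=
  (PySem.List.dedup (l.map (fun p => p.1))).map (fun m =>
    (m, PySem.List.dedup ((l.filter (fun p => p.1 == m)).map (fun p => p.2))))

lemma pv_dedup_snoc {α : Type} [BEq α] [LawfulBEq α] (cs : List α) (c : α) :
    PySem.Set.ofList (cs ++ [c]) =
      if c ∈ cs then PySem.Set.ofList cs else PySem.Set.ofList cs ++ [c] := by
  split_ifs with h <;> simp [pysem, h]

-- the invariant: A's dict after any prefix IS B's table of that prefix
lemma pv_inv (l : List (String × String)) :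
    (l.foldl pvStepA PySem.Dict.empty).items = pvTab l := by
  induction l using List.reverseRecOn with
  | nil => simp [pvTab, PySem.Dict.empty, pysem]
  | append_singleton l q ih =>
    obtain ⟨m, c⟩ := q
    rw [List.foldl_append]
    simp only [List.foldl_cons, List.foldl_nil]
    set d := l.foldl pvStepA PySem.Dict.empty with hd
    -- facts about d from ih
    have hkeys : d.keys = PySem.List.dedup (l.map (fun p => p.1)) := by
      show d.items.map (·.1) = _
      rw [ih, pvTab, List.map_map]
      simp [Function.comp_def]
    have hnd : d.keys.Nodup := by rw [hkeys]; exact PySem.List.nodup_dedup _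
    have hcont : d.contains m = decide (m ∈ l.map (fun p => p.1)) := by
      rw [PySem.Dict.contains_eq_decide_mem_keys, hkeys]
      simp
    by_cases hm : m ∈ l.map (fun p => p.1)
    · -- m already a key
      have hcontT : d.contains m = true := by rw [hcont]; simpa using hm
      have hmemK : m ∈ PySem.List.dedup (l.map (fun p => p.1)) := by
        simpa [PySem.List.mem_dedup] using hm
      have hmemI : (m, PySem.List.dedup ((l.filter (fun p => p.1 == m)).map (fun p => p.2))) ∈ d.items := by
        rw [ih, pvTab]; exact List.mem_map.mpr ⟨m, hmemK, rfl⟩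
      have hgD : d.getD m [] = PySem.List.dedup ((l.filter (fun p => p.1 == m)).map (fun p => p.2)) :=
        PySem.Dict.getD_of_mem_items d hmemI hnd []
      have hTab : pvTab (l ++ [(m, c)]) =
          (PySem.List.dedup (l.map (fun p => p.1))).map (fun m' =>
            (m', PySem.List.dedup (((l.filter (fun p => p.1 == m')).map (fun p => p.2)) ++
                 (if m' == m then [c] else [])))) := by
        rw [pvTab]
        have hkeq : PySem.List.dedup ((l ++ [(m, c)]).map (fun p => p.1)) =
            PySem.List.dedup (l.map (fun p => p.1)) := by
          rw [List.map_append]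
          simp [pv_dedup_snoc, hm]
        rw [hkeq]
        apply List.map_congr_left
        intro m' _
        rw [List.filter_append, List.map_append]
        by_cases hmm : m' = m
        · simp [hmm]
        · have hmm2 : ¬ (m = m') := fun h => hmm h.symm
          simp [hmm, hmm2]
      by_cases hcin : c ∈ (l.filter (fun p => p.1 == m)).map (fun p => p.2)
      · -- duplicate colour: A leaves d unchanged
        have hA : pvStepA d (m, c) = d := by
          simp [pvStepA, hcontT, hgD, hcin]
        rw [hA, ih, hTab, pvTab]
        apply List.map_congr_left
        intro m' _
        by_cases hmm : m' = m
        · simp [hmm, pv_dedup_snoc, hcin]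
        · simp [hmm]
      · -- new colour: A appends c to m's group
        have hA : pvStepA d (m, c) =
            d.insert m (PySem.List.dedup ((l.filter (fun p => p.1 == m)).map (fun p => p.2)) ++ [c]) := by
          simp [pvStepA, hcontT, hgD, PySem.Dict.modify, hcin]
        rw [hA, PySem.Dict.items_insert_of_contains d _ hcontT, ih, pvTab, List.map_map, hTab]
        apply List.map_congr_left
        intro m' _
        by_cases hmm : m' = m
        · simp [Function.comp, hmm, pv_dedup_snoc, hcin]
        · simp [Function.comp, hmm]
    · -- fresh key m
      have hcontF : d.contains m = false := by rw [hcont]; simpa using hm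
      have hA : pvStepA d (m, c) = d.insert m [c] := by
        simp [pvStepA, hcontF, PySem.Dict.getD_insert_self, PySem.Dict.modify,
              PySem.Dict.insert_insert_self]
      have hfl : l.filter (fun p => p.1 == m) = [] := by
        rw [List.filter_eq_nil_iff]
        intro p hp hpm
        exact hm (List.mem_map.mpr ⟨p, hp, by simpa using hpm⟩)
      rw [hA, PySem.Dict.items_insert_of_not_contains d _ hcontF, ih, pvTab, pvTab]
      have hkeq : PySem.List.dedup ((l ++ [(m, c)]).map (fun p => p.1)) =
          PySem.List.dedup (l.map (fun p => p.1)) ++ [m] := by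
        rw [List.map_append]
        simp [pv_dedup_snoc, hm]
      rw [hkeq, List.map_append]
      congr 1
      · apply List.map_congr_left
        intro m' hm'
        have hmm : ¬ (m' = m) := by
          rintro rfl
          exact hm (by rwa [← PySem.List.mem_dedup])
        have hmm2 : ¬ (m = m') := fun h => hmm h.symm
        rw [List.filter_append]
        simp [hmm, hmm2]
      · simp [List.filter_append, hfl, PySem.Set.ofList, PySem.Set.add]

-- ===== VERDICT (by name: the statement is the Claim_ definition above) =====
theorem dict_creator_spec : Claim_equal_dict_creator := by
  intro models colors _
  show dict_creator models colors = dict_creator_alt models colors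
  rw [dict_creator, dict_creator_alt, pv_inv]
  rfl
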